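-- pv_equiv track=rewrite | github.com/HIX4123/PusanNU | 1-1/CB1501007/Computer and Programming Entry/Python 2023 실습코드/3100 Function More 1(a)/300 - 재귀 (recursion) 2(c)/Recursion - 0410 - all_pairs (2).py | allpair
-- ===== SOURCE A (Python) =====
-- def allpair( L ): #리스트의 모든 쌍을 list에 담아서 출력한다.
--     if len(L) <= 1 : return ([])
--     if len(L) == 2 : return( [ [L[0],L[1] ] ] )
--
--     first = L[0]
--     caseA= [ ]
--     for x in L[1:] :
--         caseA.append( [ first, x ])
--
--     L.pop(0) # 첫번째 원소를 제거한 리스트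
--     caseB = allpair( L ) #그것의 모든 pair를 계산
--
--     caseB.extend( caseA ) #1번을 포함한 pair 원소를 합침.
--     return( caseB )
-- ===== SOURCE B (Python) =====
-- def allpair(L):
--     # Single forward pass over L reversed, keeping the already-seen suffix;
--     # note: unlike A, this does not mutate L (return value is identical).
--     out = []
--     suffix = []
--     for a in reversed(L):
--         for x in suffix:
--             out.append([a, x])
--         suffix = [a] + suffix
--     return out
-- ===== Notes on version B (the rewrite author's own statement) =====
-- stated objective: alternative
-- what changed: Replaces A's recursion-with-pop (which also mutates L in place) by a single iterative pass over reversed(L) that maintains the already-seen suffix and appends each element's pair group; B does not mutate L (return value identical).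
import Mathlib
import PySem

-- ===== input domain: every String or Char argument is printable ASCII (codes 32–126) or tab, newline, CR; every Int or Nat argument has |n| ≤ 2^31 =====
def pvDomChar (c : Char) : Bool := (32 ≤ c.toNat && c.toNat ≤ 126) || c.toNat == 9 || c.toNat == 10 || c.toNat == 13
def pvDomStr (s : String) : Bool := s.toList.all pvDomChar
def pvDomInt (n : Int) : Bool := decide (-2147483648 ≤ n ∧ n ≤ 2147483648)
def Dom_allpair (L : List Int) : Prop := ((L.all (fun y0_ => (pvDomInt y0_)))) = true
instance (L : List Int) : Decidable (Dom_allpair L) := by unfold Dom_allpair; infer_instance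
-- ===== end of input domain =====

-- B replaces A's recursion (which pops L in place) by one iterative pass over reversed(L);
-- equivalence is about the RETURN value only: A mutates L down to its last two elements, B does not mutate.

-- ===== PORT A =====
-- A's recursion: base cases for len ≤ 1 and len = 2, else caseA = loop over L[1:],
-- then recurse on L without its head and return caseB ++ caseA.
def allpair (L : List Int) : List (List Int) :=
  match L with
  | [] => []
  | [_] => []
  | [a, b] => [[a, b]]
  | first :: rest =>
    let caseA := rest.foldl (fun acc x => acc ++ [[first, x]]) []
    let caseB := allpair rest
    caseB ++ caseA

-- ===== PORT B =====
-- B's loop: fold over L.reverse carrying (out, suffix); inner loop appends [a, x] for x in suffix.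
def allpair_alt (L : List Int) : List (List Int) :=
  (L.reverse.foldl
    (fun (st : List (List Int) × List Int) a =>
      (st.2.foldl (fun out x => out ++ [[a, x]]) st.1, a :: st.2))
    ([], [])).1

-- ===== PRECONDITION & SPEC =====
def Spec_allpair (L : List Int) (out : List (List Int)) : Prop := out = allpair_alt L
instance (L : List Int) (out : List (List Int)) : Decidable (Spec_allpair L out) := by unfold Spec_allpair; infer_instance

-- ===== CLAIM (what is proved, stated in full; the proofs are below) =====
def Claim_equal_allpair : Prop := ∀ (L : List Int), Dom_allpair L → Spec_allpair L (allpair L)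

-- ===== LEMMAS AND PROOFS =====

-- the inner append loop is init ++ a map
theorem pv_foldl_app (a : Int) (l : List Int) (init : List (List Int)) :
    l.foldl (fun out x => out ++ [[a, x]]) init = init ++ l.map (fun x => [a, x]) := by
  induction l generalizing init with
  | nil => simp
  | cons y t ih => simp [List.foldl, ih]

-- A's recursion satisfies one uniform unfolding on cons
theorem pv_allpair_cons (a : Int) (t : List Int) :
    allpair (a :: t) = allpair t ++ t.map (fun x => [a, x]) := by
  match t with
  | [] => simp [allpair]
  | [b] => simp [allpair]
  | b :: c :: r =>
    simp [allpair, pv_foldl_app]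
    induction r with
    | nil => simp
    | cons y ys ih => simp [ih]

-- loop invariant: the foldr form of B's fold returns (allpair L, L)
theorem pv_invariant (L : List Int) :
    L.foldr
      (fun a (st : List (List Int) × List Int) =>
        (st.2.foldl (fun out x => out ++ [[a, x]]) st.1, a :: st.2))
      ([], []) = (allpair L, L) := by
  induction L with
  | nil => simp [allpair]
  | cons a t ih =>
    rw [List.foldr_cons, ih, pv_foldl_app, pv_allpair_cons]

theorem pv_alt_eq (L : List Int) : allpair_alt L = allpair L := by
  unfold allpair_alt
  rw [List.foldl_reverse]
  simpa using congrArg Prod.fst (pv_invariant L)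

-- ===== VERDICT (by name: the statement is the Claim_ definition above) =====
theorem allpair_spec : Claim_equal_allpair := by
  intro L _
  unfold Spec_allpair
  exact (pv_alt_eq L).symm
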